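-- pv_equiv track=rewrite | github.com/nedmv/ec | puzzles/2024/11/11.py | calc
-- ===== SOURCE A (Python) =====
-- def calc(rules, starter, days):
--     counts = {starter: 1}
--     for i in range(days):
--         next = {}
--
--         for k, v in counts.items():
--             for r in rules[k]:
--                 if r not in next:
--                     next[r] = v
--                 else:
--                     next[r] += v
--         counts = next
--
--     sum = 0
--     for _, v in counts.items():
--         sum += v
--     return sum
-- ===== SOURCE B (Python) =====
-- def calc(rules, starter, days):
--     # Dense per-stone DP: table[k] = number of stones one stone k becomes after d days,
--     # rebuilt over all rule keys once per day; a stone with no rule counts as one stone.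
--     if days <= 0:
--         return 1
--     table = {k: 1 for k in rules}
--     for _ in range(days):
--         table = {k: sum(table.get(r, 1) for r in rules[k]) for k in rules}
--     return table[starter]
-- ===== Notes on version B (the rewrite author's own statement) =====
-- stated objective: alternative
-- what changed: A forward-propagates a sparse weighted multiset of reachable stones (counts dict rebuilt by increments each day); B runs a bottom-up DP that rebuilds a dense per-stone expansion-count table over all rule keys once per day (a stone without a rule counting as one stone) and reads the answer at starter.
import Mathlib
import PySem

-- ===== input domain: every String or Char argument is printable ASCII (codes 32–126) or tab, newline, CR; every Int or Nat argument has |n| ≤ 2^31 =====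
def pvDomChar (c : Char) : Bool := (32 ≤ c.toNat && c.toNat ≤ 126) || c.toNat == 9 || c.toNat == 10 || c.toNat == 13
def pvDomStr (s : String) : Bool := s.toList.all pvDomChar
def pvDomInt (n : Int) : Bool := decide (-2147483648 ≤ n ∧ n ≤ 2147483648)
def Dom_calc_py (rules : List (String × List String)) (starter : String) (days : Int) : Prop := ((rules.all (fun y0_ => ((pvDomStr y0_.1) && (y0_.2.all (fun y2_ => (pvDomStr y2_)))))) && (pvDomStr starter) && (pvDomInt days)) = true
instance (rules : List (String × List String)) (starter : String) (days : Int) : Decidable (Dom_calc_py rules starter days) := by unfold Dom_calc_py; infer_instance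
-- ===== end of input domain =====

-- B replaces A's forward propagation of a sparse weighted counts dict by a bottom-up DP that
-- rebuilds a dense per-stone expansion-count table over all rule keys once per day (a stone
-- without a rule counting as one stone); equal return values are proved on Pre_calc_py.

-- ===== PORT A =====
-- next[r] = v / next[r] += v for one rule output r with weight v
def pvAddA (nxt : PySem.Dict String Int) (r : String) (v : Int) : PySem.Dict String Int :=
  if nxt.contains r = false then nxt.insert r v else nxt.insert r (nxt.getD r 0 + v)

-- one day: build `next` from `counts`; none = KeyError on rules[k]
def pvStepA (R : PySem.Dict String (List String)) (counts : PySem.Dict String Int) :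
    Option (PySem.Dict String Int) :=
  counts.items.foldl
    (fun acc kv =>
      acc.bind (fun nxt =>
        match R.get? kv.1 with
        | none => none
        | some rs => some (rs.foldl (fun n r => pvAddA n r kv.2) nxt)))
    (some PySem.Dict.empty)

def calc_py (rules : List (String × List String)) (starter : String) (days : Int) : Int :=
  let R := PySem.Dict.ofList rules
  let res := (PySem.List.pyRange 0 days 1).foldl
    (fun acc _ => acc.bind (pvStepA R)) (some (PySem.Dict.ofList [(starter, (1 : Int))]))
  match res with
  | none => 0   -- Python raises KeyError here; such inputs are outside Pre_calc_py
  | some counts => counts.items.foldl (fun s kv => s + kv.2) 0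

-- ===== PORT B =====
-- sum(table.get(r, 1) for r in rs)
def pvSumB (t : PySem.Dict String Int) (rs : List String) : Int :=
  rs.foldl (fun s r => s + t.getD r 1) 0

-- {k: sum(table.get(r, 1) for r in rules[k]) for k in rules}  (iterating the dict's pairs;
-- for a key k of rules, rules[k] is exactly its stored value)
def pvRowB (R : PySem.Dict String (List String)) (t : PySem.Dict String Int) :
    PySem.Dict String Int :=
  R.items.foldl (fun t' kv => t'.insert kv.1 (pvSumB t kv.2)) PySem.Dict.empty

def calc_py_alt (rules : List (String × List String)) (starter : String) (days : Int) : Int :=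
  if days ≤ 0 then 1
  else
    let R := PySem.Dict.ofList rules
    let init := R.keys.foldl (fun t k => t.insert k (1 : Int)) PySem.Dict.empty
    let t := (PySem.List.pyRange 0 days 1).foldl (fun t _ => pvRowB R t) init
    match t.get? starter with
    | none => 0   -- Python raises KeyError (then A raises too); outside Pre_calc_py
    | some v => v

-- ===== PRECONDITION & SPEC =====
-- cumulative set of stones reachable from `start` through the rule table in ≤ n steps
def pvReach (R : PySem.Dict String (List String)) (start : String) : Nat → List String
  | 0 => [start]
  | n + 1 =>
    (pvReach R start n ++ (pvReach R start n).flatMap (fun s => (R.get? s).getD [])).dedup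

-- Pre_ excludes exactly the inputs on which A raises KeyError: days > 0 and some stone
-- reachable from starter in fewer than days steps has no rule; the reach set is computed with
-- fuel min(days-1, number of rule outputs + 1), a depth by which the growing reach chain has
-- always stabilized (the stability disjunct only keeps the condition finitely checkable).
def Pre_calc_py (rules : List (String × List String)) (starter : String) (days : Int) : Prop :=
  days ≤ 0 ∨
    ((∀ x ∈ pvReach (PySem.Dict.ofList rules) starter
        (min (days.toNat - 1) ((rules.flatMap (fun p => p.2)).length + 1)),
        ((PySem.Dict.ofList rules).get? x).isSome = true) ∧
     (days.toNat - 1 ≤ (rules.flatMap (fun p => p.2)).length + 1 ∨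
      ∀ x ∈ pvReach (PySem.Dict.ofList rules) starter ((rules.flatMap (fun p => p.2)).length + 2),
        x ∈ pvReach (PySem.Dict.ofList rules) starter ((rules.flatMap (fun p => p.2)).length + 1)))
instance (rules : List (String × List String)) (starter : String) (days : Int) : Decidable (Pre_calc_py rules starter days) := by unfold Pre_calc_py; infer_instance

def pvWitness_calc_py : (List (String × List String)) × String × Int := ([("a", ["a", "a"])], "a", 2)

def Spec_calc_py (rules : List (String × List String)) (starter : String) (days : Int) (out : Int) : Prop := out = calc_py_alt rules starter days
instance (rules : List (String × List String)) (starter : String) (days : Int) (out : Int) : Decidable (Spec_calc_py rules starter days out) := by unfold Spec_calc_py; infer_instance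

-- ===== CLAIM (what is proved, stated in full; the proofs are below) =====
def Claim_equal_calc_py : Prop := ∀ (rules : List (String × List String)) (starter : String) (days : Int), Dom_calc_py rules starter days → Pre_calc_py rules starter days → Spec_calc_py rules starter days (calc_py rules starter days)

-- ===== LEMMAS AND PROOFS =====

-- the common specification: pvF R n s = number of stones one stone s becomes after n days
def pvF (R : PySem.Dict String (List String)) : Nat → String → Int
  | 0, _ => 1
  | n + 1, s => (((R.get? s).getD []).map (pvF R n)).sum

-- what B's table computes: like pvF, but a stone without a rule counts as one stone
def pvG (R : PySem.Dict String (List String)) : Nat → String → Int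
  | 0, _ => 1
  | n + 1, s =>
    (((R.get? s).getD []).map (fun r => if (R.get? r).isSome then pvG R n r else 1)).sum

-- weighted total of a counts dict
def pvSumW (d : PySem.Dict String Int) (g : String → Int) : Int :=
  (d.items.map (fun p => p.2 * g p.1)).sum

-- B's table invariant after n days
def pvAgreeB (R : PySem.Dict String (List String)) (t : PySem.Dict String Int) (n : Nat) : Prop :=
  (∀ k vs, R.get? k = some vs → t.get? k = some (pvG R n k)) ∧
  (∀ k, R.get? k = none → t.get? k = none)

theorem pv_foldl_const {α β : Type} (l : List α) (F : β → β) :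
    ∀ (i : β), l.foldl (fun a _ => F a) i = F^[l.length] i := by
  induction l with
  | nil => intro i; rfl
  | cons a l ih =>
    intro i
    rw [List.foldl_cons, List.length_cons, Function.iterate_succ_apply]
    exact ih (F i)

-- reachability lemmas
theorem pv_reach_self (R : PySem.Dict String (List String)) (start : String) :
    start ∈ pvReach R start 0 := by simp [pvReach]

theorem pv_reach_succ_mem (R : PySem.Dict String (List String)) (start x : String) (n : Nat)
    (h : x ∈ pvReach R start n) : x ∈ pvReach R start (n + 1) := by
  simp only [pvReach, List.mem_dedup, List.mem_append]
  exact Or.inl h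

theorem pv_reach_mono (R : PySem.Dict String (List String)) (start x : String) :
    ∀ {n m : Nat}, n ≤ m → x ∈ pvReach R start n → x ∈ pvReach R start m := by
  intro n m hnm hx
  induction m with
  | zero => rwa [Nat.le_zero.mp hnm] at hx
  | succ m ih =>
    rcases Nat.lt_or_ge n (m + 1) with h | h
    · exact pv_reach_succ_mem R start x m (ih (Nat.lt_succ_iff.mp h))
    · rwa [Nat.le_antisymm hnm h] at hx

theorem pv_reach_step (R : PySem.Dict String (List String)) (start s r : String)
    (vs : List String) (n : Nat) (hs : s ∈ pvReach R start n) (hvs : R.get? s = some vs)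
    (hr : r ∈ vs) : r ∈ pvReach R start (n + 1) := by
  simp only [pvReach, List.mem_dedup, List.mem_append, List.mem_flatMap]
  exact Or.inr ⟨s, hs, by simp [hvs, hr]⟩

theorem pv_reach_shift (R : PySem.Dict String (List String)) (s r : String)
    (hr : r ∈ (R.get? s).getD []) :
    ∀ (i : Nat) (x : String), x ∈ pvReach R r i → x ∈ pvReach R s (i + 1) := by
  intro i
  induction i with
  | zero =>
    intro x hx
    have hxr : x = r := by simpa [pvReach] using hx
    cases h : R.get? s with
    | none => rw [h] at hr; cases hr
    | some vs =>
      rw [h] at hr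
      exact hxr ▸ pv_reach_step R s s r vs 0 (pv_reach_self R s) h hr
  | succ i ih =>
    intro x hx
    simp only [pvReach, List.mem_dedup, List.mem_append, List.mem_flatMap] at hx
    rcases hx with h | ⟨y, hy, hxy⟩
    · exact pv_reach_succ_mem R s x (i + 1) (ih x h)
    · cases hgy : R.get? y with
      | none => rw [hgy] at hxy; cases hxy
      | some vs =>
        rw [hgy] at hxy
        exact pv_reach_step R s y x vs (i + 1) (ih y hy) hgy hxy

theorem pv_stab (R : PySem.Dict String (List String)) (start : String) (N : Nat)
    (hstab : ∀ x ∈ pvReach R start (N + 1), x ∈ pvReach R start N) :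
    ∀ (j : Nat) (x : String), x ∈ pvReach R start (N + j) → x ∈ pvReach R start N := by
  intro j
  induction j with
  | zero => intro x hx; exact hx
  | succ j ih =>
    intro x hx
    have : N + (j + 1) = (N + j) + 1 := rfl
    rw [this] at hx
    simp only [pvReach, List.mem_dedup, List.mem_append, List.mem_flatMap] at hx
    rcases hx with h | ⟨y, hy, hxy⟩
    · exact ih x h
    · cases hgy : R.get? y with
      | none => rw [hgy] at hxy; cases hxy
      | some vs =>
        rw [hgy] at hxy
        exact hstab x (pv_reach_step R start y x vs N (ih y hy) hgy hxy)

-- Pre_ gives: every stone reachable within < T steps is a key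
theorem pv_pre_keys (R : PySem.Dict String (List String)) (start : String) (T N : Nat)
    (h1 : ∀ x ∈ pvReach R start (min (T - 1) (N + 1)), (R.get? x).isSome = true)
    (h2 : T - 1 ≤ N + 1 ∨
      ∀ x ∈ pvReach R start (N + 2), x ∈ pvReach R start (N + 1)) :
    ∀ (i : Nat), i < T → ∀ x ∈ pvReach R start i, (R.get? x).isSome = true := by
  intro i hi x hx
  by_cases hle : i ≤ min (T - 1) (N + 1)
  · exact h1 x (pv_reach_mono R start x hle hx)
  · have hm : min (T - 1) (N + 1) = N + 1 := by omega
    have hN : ¬ (T - 1 ≤ N + 1) := by omega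
    rcases h2 with h | hstab
    · exact absurd h hN
    · have hxN : x ∈ pvReach R start (N + 1) := by
        have : i = (N + 1) + (i - (N + 1)) := by omega
        exact pv_stab R start (N + 1) hstab (i - (N + 1)) x (this ▸ hx)
      exact h1 x (by rw [hm]; exact hxN)

-- ----- A-side -----
theorem pv_sum_upd (g : String → Int) (r : String) (val w : Int) :
    ∀ (l : List (String × Int)), (l.map Prod.fst).Nodup → (r, val) ∈ l →
    ((l.map (fun p => if p.1 == r then (r, w) else p)).map (fun p => p.2 * g p.1)).sum
      = (l.map (fun p => p.2 * g p.1)).sum - val * g r + w * g r := by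
  intro l
  induction l with
  | nil => intro _ hmem; cases hmem
  | cons p l ih =>
    intro hnd hmem
    rw [List.map_cons, List.nodup_cons] at hnd
    by_cases hp : p.1 = r
    · have hpv : p = (r, val) := by
        rcases List.mem_cons.mp hmem with h | h
        · exact h.symm
        · exact absurd (List.mem_map.mpr ⟨(r, val), h, rfl⟩) (hp ▸ hnd.1)
      have htail : l.map (fun p => if p.1 == r then (r, w) else p) = l := by
        have h0 : l.map (fun p => if p.1 == r then (r, w) else p) = l.map id := by
          refine List.map_congr_left (fun q hq => ?_)
          have hqr : q.1 ≠ r := fun h =>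
            hnd.1 (List.mem_map.mpr ⟨q, hq, h.trans hp.symm⟩)
          simp [hqr]
        simpa using h0
      subst hpv
      have hhead : (if (((r, val) : String × Int).1 == r) = true then (r, w) else (r, val))
          = (r, w) := by simp
      rw [List.map_cons, hhead, htail, List.map_cons, List.map_cons]
      simp only [List.sum_cons]
      ring
    · have hmem' : (r, val) ∈ l := by
        rcases List.mem_cons.mp hmem with h | h
        · exact absurd (congrArg Prod.fst h.symm) hp
        · exact h
      have hne : (p.1 == r) = false := by simp [hp]
      rw [List.map_cons, List.map_cons, hne]
      simp only [if_false, List.map_cons, List.sum_cons, Bool.false_eq_true]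
      rw [ih hnd.2 hmem']
      ring

theorem pv_addA (d : PySem.Dict String Int) (r : String) (v : Int)
    (hnd : d.keys.Nodup) :
    (∀ g, pvSumW (pvAddA d r v) g = pvSumW d g + v * g r) ∧ (pvAddA d r v).keys.Nodup ∧
      (∀ k ∈ (pvAddA d r v).keys, k ∈ d.keys ∨ k = r) := by
  cases hc : d.contains r with
  | false =>
    have hi := PySem.Dict.items_insert_of_not_contains d v hc
    have hk := PySem.Dict.keys_insert_of_not_contains d v hc
    refine ⟨fun g => ?_, ?_, ?_⟩
    · simp [pvAddA, hc, pvSumW, hi]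
    · simpa [pvAddA, hc] using PySem.Dict.nodup_keys_insert d r v hnd
    · intro k hk2
      have he : pvAddA d r v = d.insert r v := by simp [pvAddA, hc]
      rw [he, hk] at hk2
      simpa using List.mem_append.mp hk2
  | true =>
    have h1 : (d.get? r).isSome := by rw [← PySem.Dict.contains_eq_isSome_get?, hc]
    obtain ⟨val, hval⟩ := Option.isSome_iff_exists.mp h1
    have hgd : d.getD r 0 = val := PySem.Dict.getD_of_get?_eq_some d 0 hval
    have hmem : (r, val) ∈ d.items := PySem.Dict.mem_items_of_get?_eq_some d hval
    have he : pvAddA d r v = d.insert r (d.getD r 0 + v) := by simp [pvAddA, hc]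
    refine ⟨fun g => ?_, ?_, ?_⟩
    · rw [he]
      unfold pvSumW
      rw [PySem.Dict.items_insert_of_contains d (d.getD r 0 + v) hc,
        pv_sum_upd g r val (d.getD r 0 + v) d.items hnd hmem, hgd]
      ring
    · rw [he]
      exact PySem.Dict.nodup_keys_insert d r _ hnd
    · intro k hk2
      rw [he, PySem.Dict.keys_insert_of_contains d _ hc] at hk2
      exact Or.inl hk2

theorem pv_inner (v : Int) (rs : List String) :
    ∀ (d : PySem.Dict String Int), d.keys.Nodup →
    (∀ g, pvSumW (rs.foldl (fun n r => pvAddA n r v) d) g = pvSumW d g + v * (rs.map g).sum) ∧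
      (rs.foldl (fun n r => pvAddA n r v) d).keys.Nodup ∧
      (∀ k ∈ (rs.foldl (fun n r => pvAddA n r v) d).keys, k ∈ d.keys ∨ k ∈ rs) := by
  induction rs with
  | nil => intro d hnd; refine ⟨fun g => by simp, hnd, fun k hk => Or.inl hk⟩
  | cons r rs ih =>
    intro d hnd
    obtain ⟨ha1, ha2, ha3⟩ := pv_addA d r v hnd
    obtain ⟨hi1, hi2, hi3⟩ := ih (pvAddA d r v) ha2
    refine ⟨fun g => ?_, hi2, fun k hk => ?_⟩
    · rw [List.foldl_cons, hi1 g, ha1 g]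
      simp only [List.map_cons, List.sum_cons]
      ring
    · rw [List.foldl_cons] at hk
      rcases hi3 k hk with h | h
      · rcases ha3 k h with h' | h'
        · exact Or.inl h'
        · exact Or.inr (h' ▸ List.mem_cons_self)
      · exact Or.inr (List.mem_cons_of_mem _ h)

theorem pv_stepA_aux (R : PySem.Dict String (List String)) (l : List (String × Int)) :
    ∀ (acc : PySem.Dict String Int), (∀ p ∈ l, (R.get? p.1).isSome) → acc.keys.Nodup →
    ∃ d', l.foldl
        (fun a kv =>
          a.bind (fun nxt =>
            match R.get? kv.1 with
            | none => none
            | some rs => some (rs.foldl (fun n r => pvAddA n r kv.2) nxt)))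
        (some acc) = some d' ∧
      d'.keys.Nodup ∧
      (∀ k ∈ d'.keys, k ∈ acc.keys ∨ ∃ p ∈ l, ∃ vs, R.get? p.1 = some vs ∧ k ∈ vs) ∧
      ∀ n, pvSumW d' (pvF R n) =
        pvSumW acc (pvF R n) + (l.map (fun p => p.2 * pvF R (n + 1) p.1)).sum := by
  induction l with
  | nil =>
    intro acc _ hnd
    exact ⟨acc, rfl, hnd, fun k hk => Or.inl hk, fun n => by simp⟩
  | cons p l ih =>
    intro acc hl hnd
    obtain ⟨rs, hrs⟩ := Option.isSome_iff_exists.mp (hl p List.mem_cons_self)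
    obtain ⟨hi1, hi2, hi3⟩ := pv_inner p.2 rs acc hnd
    obtain ⟨d', hd1, hd2, hd3, hd4⟩ :=
      ih (rs.foldl (fun n r => pvAddA n r p.2) acc)
        (fun q hq => hl q (List.mem_cons_of_mem _ hq)) hi2
    refine ⟨d', ?_, hd2, ?_, fun n => ?_⟩
    · rw [List.foldl_cons]
      have hstep : (some acc).bind
          (fun nxt =>
            match R.get? p.1 with
            | none => none
            | some rs => some (rs.foldl (fun n r => pvAddA n r p.2) nxt)) =
          some (rs.foldl (fun n r => pvAddA n r p.2) acc) := by
        simp [hrs]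
      rw [hstep]
      exact hd1
    · intro k hk
      rcases hd3 k hk with h | ⟨q, hq, vs, hqvs, hkvs⟩
      · rcases hi3 k h with h' | h'
        · exact Or.inl h'
        · exact Or.inr ⟨p, List.mem_cons_self, rs, hrs, h'⟩
      · exact Or.inr ⟨q, List.mem_cons_of_mem _ hq, vs, hqvs, hkvs⟩
    · have hf : pvF R (n + 1) p.1 = (rs.map (pvF R n)).sum := by simp [pvF, hrs]
      rw [hd4 n, hi1 (pvF R n)]
      simp only [List.map_cons, List.sum_cons, hf]
      ring

theorem pv_stepA (R : PySem.Dict String (List String))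
    (d : PySem.Dict String Int) (_hnd : d.keys.Nodup)
    (hok : ∀ k ∈ d.keys, (R.get? k).isSome) :
    ∃ d', pvStepA R d = some d' ∧ d'.keys.Nodup ∧
      (∀ k ∈ d'.keys, ∃ s ∈ d.keys, ∃ vs, R.get? s = some vs ∧ k ∈ vs) ∧
      ∀ n, pvSumW d' (pvF R n) = pvSumW d (pvF R (n + 1)) := by
  have hl : ∀ p ∈ d.items, (R.get? p.1).isSome := fun p hp =>
    hok p.1 (List.mem_map.mpr ⟨p, hp, rfl⟩)
  have hkE : (PySem.Dict.empty : PySem.Dict String Int).keys = [] := rfl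
  have hndE : (PySem.Dict.empty : PySem.Dict String Int).keys.Nodup := by
    rw [hkE]; exact List.nodup_nil
  obtain ⟨d', h1, h2, h3, h4⟩ := pv_stepA_aux R d.items PySem.Dict.empty hl hndE
  refine ⟨d', h1, h2, fun k hk => ?_, fun n => ?_⟩
  · rcases h3 k hk with h | ⟨p, hp, vs, hpvs, hkvs⟩
    · rw [hkE] at h; cases h
    · exact ⟨p.1, List.mem_map.mpr ⟨p, hp, rfl⟩, vs, hpvs, hkvs⟩
  · rw [h4 n]
    rw [show pvSumW PySem.Dict.empty (pvF R n) = 0 from rfl, zero_add]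
    rfl

theorem pv_iterA (R : PySem.Dict String (List String)) (start : String) (T : Nat)
    (HK : ∀ i, i < T → ∀ x ∈ pvReach R start i, (R.get? x).isSome = true) :
    ∀ (m : Nat), ∀ (i : Nat), i + m = T → ∀ (d : PySem.Dict String Int), d.keys.Nodup →
    (∀ k ∈ d.keys, k ∈ pvReach R start i) →
    ∃ c, (fun a : Option (PySem.Dict String Int) => a.bind (pvStepA R))^[m] (some d) = some c ∧
      pvSumW c (pvF R 0) = pvSumW d (pvF R m) := by
  intro m
  induction m with
  | zero => intro i _ d hnd _; exact ⟨d, rfl, rfl⟩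
  | succ m ih =>
    intro i hiT d hnd hin
    have hiLt : i < T := by omega
    obtain ⟨d1, hs, hnd1, hprov, hsum⟩ :=
      pv_stepA R d hnd (fun k hk => by
        have := HK i hiLt k (hin k hk); simpa using this)
    have hin1 : ∀ k ∈ d1.keys, k ∈ pvReach R start (i + 1) := by
      intro k hk
      obtain ⟨s, hsm, vs, hvs, hkvs⟩ := hprov k hk
      exact pv_reach_step R start s k vs i (hin s hsm) hvs hkvs
    obtain ⟨c, hc, hcs⟩ := ih (i + 1) (by omega) d1 hnd1 hin1
    refine ⟨c, ?_, ?_⟩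
    · rw [Function.iterate_succ_apply]
      show (fun a : Option (PySem.Dict String Int) => a.bind (pvStepA R))^[m]
        ((some d).bind (pvStepA R)) = some c
      rw [show (some d).bind (pvStepA R) = some d1 by simp [hs]]
      exact hc
    · rw [hcs, hsum m]

-- ----- B-side -----
theorem pv_sumB_fold (t : PySem.Dict String Int) (rs : List String) :
    ∀ (s0 : Int), rs.foldl (fun s r => s + t.getD r 1) s0
      = s0 + (rs.map (fun r => t.getD r 1)).sum := by
  induction rs with
  | nil => intro s0; simp
  | cons r rs ih =>
    intro s0
    rw [List.foldl_cons, ih (s0 + t.getD r 1)]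
    simp only [List.map_cons, List.sum_cons]
    ring

theorem pv_rowB_aux (t : PySem.Dict String Int) (l : List (String × List String)) :
    ∀ (acc : PySem.Dict String Int), (l.map Prod.fst).Nodup →
    (∀ p ∈ l, (l.foldl (fun t' kv => t'.insert kv.1 (pvSumB t kv.2)) acc).get? p.1
        = some (pvSumB t p.2)) ∧
    (∀ k, k ∉ l.map Prod.fst →
      (l.foldl (fun t' kv => t'.insert kv.1 (pvSumB t kv.2)) acc).get? k = acc.get? k) := by
  induction l with
  | nil =>
    intro acc _
    exact ⟨fun p hp => absurd hp (List.not_mem_nil), fun _ _ => rfl⟩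
  | cons p l ih =>
    intro acc hnd
    rw [List.map_cons, List.nodup_cons] at hnd
    obtain ⟨h1, h2⟩ := ih (acc.insert p.1 (pvSumB t p.2)) hnd.2
    constructor
    · intro q hq
      rw [List.foldl_cons]
      rcases List.mem_cons.mp hq with h | h
      · subst h
        have hq1 : q.1 ∉ l.map Prod.fst := hnd.1
        rw [h2 q.1 hq1, PySem.Dict.get?_insert_self]
      · exact h1 q h
    · intro k hk
      rw [List.map_cons, List.mem_cons] at hk
      simp only [not_or] at hk
      rw [List.foldl_cons, h2 k hk.2]
      exact PySem.Dict.get?_insert_of_ne acc _ hk.1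

theorem pv_rowB_agree (R : PySem.Dict String (List String)) (hnd : R.keys.Nodup)
    (t : PySem.Dict String Int) (n : Nat) (hag : pvAgreeB R t n) :
    pvAgreeB R (pvRowB R t) (n + 1) := by
  have hndI : (R.items.map Prod.fst).Nodup := hnd
  obtain ⟨hin, hout⟩ := pv_rowB_aux t R.items PySem.Dict.empty hndI
  constructor
  · intro k vs hk
    have hp : (k, vs) ∈ R.items := PySem.Dict.mem_items_of_get?_eq_some R hk
    have h1 := hin (k, vs) hp
    rw [show pvRowB R t
        = R.items.foldl (fun t' kv => t'.insert kv.1 (pvSumB t kv.2)) PySem.Dict.empty from rfl,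
      h1]
    congr 1
    unfold pvSumB
    rw [pv_sumB_fold t vs 0, zero_add]
    have hmap : vs.map (fun r => t.getD r 1)
        = vs.map (fun r => if (R.get? r).isSome then pvG R n r else 1) := by
      refine List.map_congr_left (fun r _ => ?_)
      cases hgr : R.get? r with
      | none =>
        rw [PySem.Dict.getD_eq_get?_getD, hag.2 r hgr]
        simp
      | some vs' =>
        rw [PySem.Dict.getD_eq_get?_getD, hag.1 r vs' hgr]
        simp
    rw [hmap]
    simp [pvG, hk]
  · intro k hk
    have hkm : k ∉ R.items.map Prod.fst :=
      (PySem.Dict.get?_eq_none_iff_not_mem_keys R k).mp hk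
    have h2 := hout k hkm
    rw [show pvRowB R t
        = R.items.foldl (fun t' kv => t'.insert kv.1 (pvSumB t kv.2)) PySem.Dict.empty from rfl,
      h2]
    rfl

theorem pv_init_aux (l : List String) :
    ∀ (acc : PySem.Dict String Int),
    (∀ k ∈ l, (l.foldl (fun t k => t.insert k (1 : Int)) acc).get? k = some 1) ∧
    (∀ k, k ∉ l → (l.foldl (fun t k => t.insert k (1 : Int)) acc).get? k = acc.get? k) := by
  induction l with
  | nil => intro acc; exact ⟨fun k hk => absurd hk (List.not_mem_nil), fun _ _ => rfl⟩
  | cons a l ih =>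
    intro acc
    obtain ⟨h1, h2⟩ := ih (acc.insert a 1)
    constructor
    · intro k hk
      rw [List.foldl_cons]
      by_cases hkl : k ∈ l
      · exact h1 k hkl
      · have hka : k = a := by
          rcases List.mem_cons.mp hk with h | h
          · exact h
          · exact absurd h hkl
        rw [h2 k hkl, hka, PySem.Dict.get?_insert_self]
    · intro k hk
      rw [List.mem_cons] at hk
      simp only [not_or] at hk
      rw [List.foldl_cons, h2 k hk.2]
      exact PySem.Dict.get?_insert_of_ne acc _ hk.1

theorem pv_initB (R : PySem.Dict String (List String)) :
    pvAgreeB R (R.keys.foldl (fun t k => t.insert k (1 : Int)) PySem.Dict.empty) 0 := by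
  constructor
  · intro k vs hk
    have hmem : k ∈ R.keys := by
      by_contra h
      rw [(PySem.Dict.get?_eq_none_iff_not_mem_keys R k).mpr h] at hk
      cases hk
    rw [(pv_init_aux R.keys PySem.Dict.empty).1 k hmem]
    rfl
  · intro k hk
    have hmem : k ∉ R.keys := (PySem.Dict.get?_eq_none_iff_not_mem_keys R k).mp hk
    rw [(pv_init_aux R.keys PySem.Dict.empty).2 k hmem]
    rfl

theorem pv_iterB (R : PySem.Dict String (List String)) (hnd : R.keys.Nodup) :
    ∀ (m n : Nat) (t : PySem.Dict String Int), pvAgreeB R t n →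
    pvAgreeB R ((pvRowB R)^[m] t) (n + m) := by
  intro m
  induction m with
  | zero => intro n t hag; exact hag
  | succ m ih =>
    intro n t hag
    rw [Function.iterate_succ_apply]
    have := ih (n + 1) (pvRowB R t) (pv_rowB_agree R hnd t n hag)
    rwa [show n + 1 + m = n + (m + 1) by omega] at this

-- pvG agrees with pvF when every stone reachable in < n steps has a rule
theorem pv_bridge (R : PySem.Dict String (List String)) :
    ∀ (n : Nat) (s : String),
    (∀ i, i < n → ∀ x ∈ pvReach R s i, (R.get? x).isSome = true) →
    pvG R n s = pvF R n s := by
  intro n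
  induction n with
  | zero => intro s _; rfl
  | succ n ih =>
    intro s hkeys
    have hsk : (R.get? s).isSome = true :=
      hkeys 0 (by omega) s (pv_reach_self R s)
    obtain ⟨vs, hvs⟩ := Option.isSome_iff_exists.mp hsk
    have hmap : vs.map (fun r => if (R.get? r).isSome then pvG R n r else 1)
        = vs.map (pvF R n) := by
      refine List.map_congr_left (fun r hr => ?_)
      by_cases hn : n = 0
      · subst hn
        split_ifs <;> rfl
      · have hr1 : r ∈ pvReach R s 1 :=
          pv_reach_step R s s r vs 0 (pv_reach_self R s) hvs hr
        have hrk : (R.get? r).isSome = true := hkeys 1 (by omega) r hr1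
        rw [if_pos hrk]
        refine ih r (fun i hi x hx => ?_)
        have hrm : r ∈ (R.get? s).getD [] := by simp [hvs, hr]
        exact hkeys (i + 1) (by omega) x (pv_reach_shift R s r hrm i x hx)
    simp [pvG, pvF, hvs, hmap]

theorem pv_foldl_add (l : List (String × Int)) :
    ∀ (s : Int), l.foldl (fun s kv => s + kv.2) s = s + (l.map (fun p => p.2 * 1)).sum := by
  induction l with
  | nil => intro s; simp
  | cons p l ih =>
    intro s
    rw [List.foldl_cons, ih (s + p.2)]
    simp only [List.map_cons, List.sum_cons]
    ring

theorem pv_items_singleton (starter : String) :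
    (PySem.Dict.ofList [(starter, (1 : Int))]).items = [(starter, 1)] := by
  show ((PySem.Dict.empty : PySem.Dict String Int).insert starter 1).items = _
  rw [PySem.Dict.items_insert_of_not_contains _ _ (PySem.Dict.contains_empty starter)]
  rfl

-- ===== VERDICT (by name: the statement is the Claim_ definition above) =====
theorem calc_py_spec : Claim_equal_calc_py := by
  intro rules starter days _ hpre
  unfold Spec_calc_py
  have hitems := pv_items_singleton starter
  by_cases hd : days ≤ 0
  · have hnil : PySem.List.pyRange 0 days 1 = [] := PySem.List.pyRange_one_eq_nil hd
    simp [calc_py, calc_py_alt, hnil, hd, hitems]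
  · rcases hpre with h | ⟨h1, h2⟩
    · omega
    have hT1 : 1 ≤ days.toNat := by omega
    have HK := pv_pre_keys (PySem.Dict.ofList rules) starter days.toNat
      ((rules.flatMap (fun p => p.2)).length) h1 h2
    have hndR : (PySem.Dict.ofList rules).keys.Nodup := PySem.Dict.nodup_keys_ofList rules
    -- A's side
    have hkeysI : (PySem.Dict.ofList [(starter, (1 : Int))]).keys = [starter] := by
      show (PySem.Dict.ofList [(starter, (1 : Int))]).items.map Prod.fst = _
      rw [hitems]; rfl
    have hndI : (PySem.Dict.ofList [(starter, (1 : Int))]).keys.Nodup := by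
      rw [hkeysI]; simp
    have hinI : ∀ k ∈ (PySem.Dict.ofList [(starter, (1 : Int))]).keys,
        k ∈ pvReach (PySem.Dict.ofList rules) starter 0 := by
      intro k hk
      rw [hkeysI] at hk
      simp at hk
      rw [hk]
      exact pv_reach_self _ _
    obtain ⟨c, hcEq, hcSum⟩ := pv_iterA (PySem.Dict.ofList rules) starter days.toNat HK
      days.toNat 0 (by omega) _ hndI hinI
    have hresA : (PySem.List.pyRange 0 days 1).foldl
        (fun acc _ => acc.bind (pvStepA (PySem.Dict.ofList rules)))
        (some (PySem.Dict.ofList [(starter, (1 : Int))])) = some c := by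
      have h1 := pv_foldl_const (PySem.List.pyRange 0 days 1)
        (fun a : Option (PySem.Dict String Int) => a.bind (pvStepA (PySem.Dict.ofList rules)))
        (some (PySem.Dict.ofList [(starter, (1 : Int))]))
      refine h1.trans ?_
      rw [PySem.List.length_pyRange_one]
      rw [show ((days - 0 : Int)).toNat = days.toNat by omega]
      exact hcEq
    have hA : calc_py rules starter days
        = pvF (PySem.Dict.ofList rules) days.toNat starter := by
      simp only [calc_py]
      rw [hresA]
      show c.items.foldl (fun s kv => s + kv.2) 0 = _
      rw [pv_foldl_add c.items 0, zero_add]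
      have : (c.items.map (fun p => p.2 * 1)).sum = pvSumW c (pvF (PySem.Dict.ofList rules) 0) := rfl
      rw [this, hcSum]
      unfold pvSumW
      rw [hitems]
      simp
    -- B's side
    have hagF := pv_iterB (PySem.Dict.ofList rules) hndR days.toNat 0 _
      (pv_initB (PySem.Dict.ofList rules))
    have hstk : ((PySem.Dict.ofList rules).get? starter).isSome = true :=
      HK 0 (by omega) starter (pv_reach_self _ _)
    obtain ⟨vs, hvs⟩ := Option.isSome_iff_exists.mp hstk
    have hBt := hagF.1 starter vs hvs
    have hresB : (PySem.List.pyRange 0 days 1).foldl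
        (fun t _ => pvRowB (PySem.Dict.ofList rules) t)
        ((PySem.Dict.ofList rules).keys.foldl
          (fun t k => t.insert k (1 : Int)) PySem.Dict.empty)
        = (pvRowB (PySem.Dict.ofList rules))^[days.toNat]
          ((PySem.Dict.ofList rules).keys.foldl
            (fun t k => t.insert k (1 : Int)) PySem.Dict.empty) := by
      have h1 := pv_foldl_const (PySem.List.pyRange 0 days 1)
        (pvRowB (PySem.Dict.ofList rules))
        ((PySem.Dict.ofList rules).keys.foldl
          (fun t k => t.insert k (1 : Int)) PySem.Dict.empty)
      refine h1.trans ?_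
      rw [PySem.List.length_pyRange_one]
      rw [show ((days - 0 : Int)).toNat = days.toNat by omega]
    have hB : calc_py_alt rules starter days
        = pvG (PySem.Dict.ofList rules) days.toNat starter := by
      simp only [calc_py_alt, if_neg hd]
      rw [hresB]
      rw [show (0 : Nat) + days.toNat = days.toNat from by omega] at hBt
      rw [hBt]
    rw [hA, hB, pv_bridge (PySem.Dict.ofList rules) days.toNat starter HK]
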